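-- pv_equiv track=rewrite | github.com/prabhakarKandel69/Hackathon-BitEr | Data Organization/Work_Experience Extraction.py | extract_work_experience
-- ===== SOURCE A (Python) =====
-- def extract_work_experience(text):
--     """
--     Extract the Work Experience section from the given text.
--     :param text: The full text of the CV.
--     :return: Extracted Work Experience section as a string.
--     """
--     # Define keywords typically associated with work experience sections
--     experience_keywords = [
--         "experience", "work experience", "employment history", "professional experience",
--         "career summary", "work history", "job responsibilities", "positions held"
--     ]
--
--     lines = text.split("\n")
--     work_experience = []
--     capture = False  # Boolean flag to capture lines related to work experience
--
--     for line in lines: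
--         normalized_line = line.lower().strip()
--         if any(keyword in normalized_line for keyword in experience_keywords):
--             capture = True
--             work_experience.append(line)  # Add the keyword line itself
--             continue
--         if capture:
--             if line.strip():
--                 work_experience.append(line)
--             else:
--                 break
--
--     return "\n".join(work_experience) if work_experience else "No work experience section found."
-- ===== SOURCE B (Python) =====
-- def extract_work_experience(text):
--     """
--     Extract the Work Experience section from the given text.
--     :param text: The full text of the CV.
--     :return: Extracted Work Experience section as a string.
--     """
--     experience_keywords = [
--         "experience", "work experience", "employment history", "professional experience",
--         "career summary", "work history", "job responsibilities", "positions held"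
--     ]
--
--     lines = text.split("\n")
--     # Find the first line containing a keyword (case-insensitive, stripped).
--     start = next(
--         (i for i, line in enumerate(lines)
--          if any(kw in line.lower().strip() for kw in experience_keywords)),
--         None,
--     )
--     if start is None:
--         return "No work experience section found."
--     # Collect the contiguous non-blank block starting at the keyword line.
--     tail = lines[start:]
--     end = 0
--     while end < len(tail) and tail[end].strip():
--         end += 1
--     return "\n".join(tail[:end])
-- ===== Notes on version B (the rewrite author's own statement) =====
-- stated objective: simpler
-- what changed: Replaces A's single flag-driven loop (capture boolean, accumulator list, early break) by a two-step decomposition: find the index of the first keyword line, then take the contiguous non-blank block starting there.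
import Mathlib
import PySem

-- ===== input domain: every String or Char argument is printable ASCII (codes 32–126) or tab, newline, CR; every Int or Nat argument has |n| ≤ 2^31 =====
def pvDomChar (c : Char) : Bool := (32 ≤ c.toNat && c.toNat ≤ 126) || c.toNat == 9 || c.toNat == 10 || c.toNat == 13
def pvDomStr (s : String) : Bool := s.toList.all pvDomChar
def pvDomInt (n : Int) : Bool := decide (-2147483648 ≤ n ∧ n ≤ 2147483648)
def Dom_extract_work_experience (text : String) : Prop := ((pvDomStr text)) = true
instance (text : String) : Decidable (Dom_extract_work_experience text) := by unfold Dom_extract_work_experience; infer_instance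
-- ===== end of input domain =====

-- B replaces A's flag-driven accumulator loop by a plainer decomposition: find the first
-- keyword line's index, then take the contiguous non-blank block from there (objective: simpler).

-- ===== PORT A =====

-- the keyword list, shared verbatim by both programs
def ewKeywords : List String :=
  ["experience", "work experience", "employment history", "professional experience",
   "career summary", "work history", "job responsibilities", "positions held"]

-- any(keyword in line.lower().strip() for keyword in experience_keywords)
def ewHasKw (line : String) : Bool :=
  ewKeywords.any (fun kw => PySem.Str.isIn kw (PySem.Str.strip (PySem.Str.lower line)))

-- truthiness of line.strip(): True iff the stripped string is non-empty
def ewBlank (line : String) : Bool := (PySem.Str.strip line).toList.isEmpty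

-- A's for-loop with its capture flag and early break, as structural recursion over the lines
def ewLoopA : List String → List String → Bool → List String
  | [], acc, _ => acc
  | l :: rest, acc, capture =>
    if ewHasKw l then ewLoopA rest (acc ++ [l]) true
    else if capture then
      if ewBlank l then acc else ewLoopA rest (acc ++ [l]) capture
    else ewLoopA rest acc capture

def extract_work_experience (text : String) : String :=
  -- text.split("\n"): the separator is the literal "\n" ≠ "", so split? is always some
  let lines := (PySem.Str.split? text "\n").getD []
  let we := ewLoopA lines [] false
  if we.isEmpty then "No work experience section found." else PySem.Str.join "\n" we

-- ===== PORT B =====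

-- the for/enumerate search with break: index of the first keyword line
def ewFindStart : List String → Nat → Option Nat
  | [], _ => none
  | l :: rest, i => if ewHasKw l then some i else ewFindStart rest (i + 1)

-- while end < len(tail) and tail[end].strip(): end += 1
def ewScanEnd (tail : List String) (e : Nat) : Nat :=
  if h : e < tail.length then
    if ewBlank tail[e] then e else ewScanEnd tail (e + 1)
  else e
termination_by tail.length - e

def extract_work_experience_alt (text : String) : String :=
  let lines := (PySem.Str.split? text "\n").getD []
  match ewFindStart lines 0 with
  | none => "No work experience section found."
  | some s =>
    -- lines[s:] with 0 ≤ s is List.drop s (PySem.List.slice_from); tail[:end] with 0 ≤ end is List.take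
    let tail := lines.drop s
    PySem.Str.join "\n" (tail.take (ewScanEnd tail 0))

-- ===== PRECONDITION & SPEC =====
def Spec_extract_work_experience (text : String) (out : String) : Prop := out = extract_work_experience_alt text
instance (text : String) (out : String) : Decidable (Spec_extract_work_experience text out) := by unfold Spec_extract_work_experience; infer_instance

-- ===== CLAIM (what is proved, stated in full; the proofs are below) =====
def Claim_equal_extract_work_experience : Prop := ∀ (text : String), Dom_extract_work_experience text → Spec_extract_work_experience text (extract_work_experience text)

-- ===== LEMMAS AND PROOFS =====

-- ASCII lowering never turns a character into or out of whitespace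
theorem ewIsspace_lowerChar (c : Char) : PySem.Chars.isspace (PySem.Chars.lowerChar c) = PySem.Chars.isspace c := by
  unfold PySem.Chars.lowerChar
  by_cases h : PySem.Chars.isupper c = true
  · have h1 : 65 ≤ c.toNat ∧ c.toNat ≤ 90 := by
      simp only [PySem.Chars.isupper, Char.le_def, Bool.and_eq_true, decide_eq_true_eq] at h
      exact ⟨h.1, h.2⟩
    have hv : (Char.ofNat (c.toNat + 32)).toNat = c.toNat + 32 := by
      rw [Char.toNat_ofNat]
      have : (c.toNat + 32).isValidChar := by
        unfold Nat.isValidChar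
        omega
      simp [this]
    have hs1 : PySem.Chars.isspace (Char.ofNat (c.toNat + 32)) = false := by
      simp only [PySem.Chars.isspace, hv]
      simp only [Bool.or_eq_false_iff, Bool.and_eq_false_iff, decide_eq_false_iff_not]
      omega
    have hs2 : PySem.Chars.isspace c = false := by
      simp only [PySem.Chars.isspace]
      simp only [Bool.or_eq_false_iff, Bool.and_eq_false_iff, decide_eq_false_iff_not]
      omega
    simp [h, hs1, hs2]
  · simp [h]

-- strip gives the empty string exactly on all-whitespace strings
theorem ewStrip_nil_iff (cs : List Char) :
    PySem.Chars.strip cs = [] ↔ ∀ c ∈ cs, PySem.Chars.isspace c = true := by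
  simp only [PySem.Chars.strip, PySem.Chars.rstrip, PySem.Chars.lstrip,
    List.reverse_eq_nil_iff, List.dropWhile_eq_nil_iff, List.mem_reverse]
  constructor
  · intro h c hc
    rcases (List.mem_append.mp (by rw [List.takeWhile_append_dropWhile]; exact hc :
        c ∈ List.takeWhile PySem.Chars.isspace cs ++ List.dropWhile PySem.Chars.isspace cs)) with h1 | h1
    · exact List.mem_takeWhile_imp h1
    · exact h c h1
  · intro h c hc
    exact h c ((List.dropWhile_sublist _).subset hc)

-- a line that matches a keyword is non-blank
theorem ewHasKw_not_blank {l : String} (h : ewHasKw l = true) : ewBlank l = false := by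
  by_contra hb
  have hb' : PySem.Chars.strip l.toList = [] := by
    simpa [ewBlank, List.isEmpty_iff] using hb
  have hempty : PySem.Chars.strip (PySem.Chars.lower l.toList) = [] := by
    rw [ewStrip_nil_iff] at hb' ⊢
    intro c hc
    rcases List.mem_map.mp hc with ⟨d, hd, rfl⟩
    rw [ewIsspace_lowerChar]
    exact hb' d hd
  revert h
  simp only [ewHasKw, ewKeywords, List.any_cons, List.any_nil, PySem.Str.isIn_eq,
    PySem.Str.toList_strip, PySem.Str.toList_lower, hempty]
  decide

-- once capture is on, A appends exactly the non-blank prefix of the remaining lines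
theorem ewLoopA_capture (ls : List String) : ∀ acc,
    ewLoopA ls acc true = acc ++ ls.takeWhile (fun l => !ewBlank l) := by
  induction ls with
  | nil => simp [ewLoopA]
  | cons l rest ih =>
    intro acc
    by_cases hk : ewHasKw l = true
    · have hb := ewHasKw_not_blank hk
      simp [ewLoopA, hk, ih, hb]
    · by_cases hb : ewBlank l = true
      · simp [ewLoopA, hk, hb]
      · simp only [Bool.not_eq_true] at hb
        simp [ewLoopA, hk, hb, ih]

-- the while-loop computes the length of the non-blank prefix (offset by its start index)
theorem ewScanEnd_eq (tail : List String) : ∀ e, e ≤ tail.length →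
    ewScanEnd tail e = e + ((tail.drop e).takeWhile (fun l => !ewBlank l)).length := by
  intro e he
  induction hn : tail.length - e using Nat.strong_induction_on generalizing e with
  | _ n ih =>
    rw [ewScanEnd]
    by_cases hlt : e < tail.length
    · have hdrop : tail.drop e = tail[e] :: tail.drop (e + 1) := List.drop_eq_getElem_cons hlt
      rw [dif_pos hlt, hdrop, List.takeWhile_cons]
      by_cases hb : ewBlank tail[e] = true
      · simp [hb]
      · simp only [Bool.not_eq_true] at hb
        have hrec := ih (tail.length - (e + 1)) (by omega) (e + 1) (by omega) rfl
        rw [if_neg (by simp [hb]), hrec]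
        simp [hb]
        omega
    · have he' : e = tail.length := by omega
      rw [dif_neg hlt]
      simp [he']

-- taking the scanned prefix from the start is exactly the non-blank takeWhile
theorem ewScanEnd_take (tail : List String) :
    tail.take (ewScanEnd tail 0) = tail.takeWhile (fun l => !ewBlank l) := by
  rw [ewScanEnd_eq tail 0 (Nat.zero_le _), Nat.zero_add, List.drop_zero]
  exact (List.prefix_iff_eq_take.mp (List.takeWhile_prefix _)).symm

-- index search is translation-invariant
theorem ewFindStart_shift (ls : List String) : ∀ i,
    ewFindStart ls i = (ewFindStart ls 0).map (· + i) := by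
  induction ls with
  | nil => intro i; simp [ewFindStart]
  | cons l rest ih =>
    intro i
    by_cases hk : ewHasKw l = true
    · simp [ewFindStart, hk]
    · simp only [ewFindStart, hk, Bool.false_eq_true, if_false]
      rw [ih (i + 1), ih 1]
      cases ewFindStart rest 0 with
      | none => simp
      | some s =>
        simp only [Option.map_some, Option.some.injEq]
        omega

-- the main correspondence: A's loop result equals B's find-then-take block
theorem ewLoopA_eq_find (ls : List String) :
    ewLoopA ls [] false =
      (match ewFindStart ls 0 with
       | none => []
       | some s => (ls.drop s).take (ewScanEnd (ls.drop s) 0)) := by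
  induction ls with
  | nil => simp [ewLoopA, ewFindStart]
  | cons l rest ih =>
    by_cases hk : ewHasKw l = true
    · have hb := ewHasKw_not_blank hk
      simp only [ewLoopA, hk, if_pos, ewFindStart]
      rw [ewLoopA_capture, ewScanEnd_take]
      simp [hb]
    · simp only [ewLoopA, hk, Bool.false_eq_true, if_false, ewFindStart, ih,
        ewFindStart_shift rest 1]
      cases hfs : ewFindStart rest 0 with
      | none => simp
      | some s => simp [List.drop_succ_cons]

-- the block is non-empty whenever a keyword line was found
theorem ewBlock_ne_nil (ls : List String) : ∀ s, ewFindStart ls 0 = some s →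
    (ls.drop s).take (ewScanEnd (ls.drop s) 0) ≠ [] := by
  induction ls with
  | nil => intro s h; simp [ewFindStart] at h
  | cons l rest ih =>
    intro s h
    by_cases hk : ewHasKw l = true
    · simp only [ewFindStart, hk, if_pos, Option.some.injEq] at h
      subst h
      have hb := ewHasKw_not_blank hk
      rw [List.drop_zero, ewScanEnd_take]
      simp [hb]
    · simp only [ewFindStart, hk, Bool.false_eq_true, if_false,
        ewFindStart_shift rest 1] at h
      cases hfs : ewFindStart rest 0 with
      | none => simp [hfs] at h
      | some s' =>
        simp only [hfs, Option.map_some, Option.some.injEq] at h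
        have hs : s = s' + 1 := h.symm
        subst hs
        rw [List.drop_succ_cons]
        exact ih s' hfs

-- ===== VERDICT (by name: the statement is the Claim_ definition above) =====
theorem extract_work_experience_spec : Claim_equal_extract_work_experience := by
  intro text _
  unfold Spec_extract_work_experience extract_work_experience extract_work_experience_alt
  simp only []
  rw [ewLoopA_eq_find]
  cases hfs : ewFindStart ((PySem.Str.split? text "\n").getD []) 0 with
  | none => simp
  | some s =>
    have hne := ewBlock_ne_nil _ s hfs
    simp [hne]
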